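-- pv_equiv track=rewrite | github.com/Ymm0709/NBA-Decision-Engine | scripts/fetch_br_league_players.py | br_uncomment_stats_tables
-- ===== SOURCE A (Python) =====
-- def br_uncomment_stats_tables(html: str) -> str:
--     """BR 常把 stats 表放在 HTML 注释里，展开后 BeautifulSoup 才能解析。"""
--     for _ in range(40):
--         start = html.find("<!--")
--         if start == -1:
--             break
--         end = html.find("-->", start)
--         if end == -1:
--             break
--         inner = html[start + 4 : end]
--         if "sortable stats_table" in inner or 'id="stats"' in inner or "per_game_stats" in inner:
--             html = html[:start] + inner + html[end + 3 :]
--         else: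
--             html = html[:start] + html[end + 3 :]
--     return html
-- ===== SOURCE B (Python) =====
-- _KEYWORDS = ("sortable stats_table", 'id="stats"', "per_game_stats")
--
--
-- def br_uncomment_stats_tables(html: str) -> str:
--     """Recursive pre/body decomposition: split the string at the first comment
--     opener, search the closer locally in the body, and recurse on the rewritten
--     string with a fuel counter of 40."""
--     def go(s: str, fuel: int) -> str:
--         if fuel == 0:
--             return s
--         i = s.find("<!--")
--         if i < 0:
--             return s
--         pre, body = s[:i], s[i:]
--         e = body.find("-->")
--         if e < 0:
--             return s
--         inner, tail = body[4:e], body[e + 3:]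
--         if any(kw in inner for kw in _KEYWORDS):
--             return go(pre + inner + tail, fuel - 1)
--         return go(pre + tail, fuel - 1)
--
--     return go(html, 40)
-- ===== Notes on version B (the rewrite author's own statement) =====
-- stated objective: alternative
-- what changed: Replaces A's 40-iteration for-loop that repeatedly rebuilds the whole string with absolute find indices by a tail-recursive helper that splits the string into a comment-free prefix and a body at the first opener, searches the closer locally in the body, tests the keywords with any() over a keyword tuple, and recurses with a fuel counter.
import Mathlib
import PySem

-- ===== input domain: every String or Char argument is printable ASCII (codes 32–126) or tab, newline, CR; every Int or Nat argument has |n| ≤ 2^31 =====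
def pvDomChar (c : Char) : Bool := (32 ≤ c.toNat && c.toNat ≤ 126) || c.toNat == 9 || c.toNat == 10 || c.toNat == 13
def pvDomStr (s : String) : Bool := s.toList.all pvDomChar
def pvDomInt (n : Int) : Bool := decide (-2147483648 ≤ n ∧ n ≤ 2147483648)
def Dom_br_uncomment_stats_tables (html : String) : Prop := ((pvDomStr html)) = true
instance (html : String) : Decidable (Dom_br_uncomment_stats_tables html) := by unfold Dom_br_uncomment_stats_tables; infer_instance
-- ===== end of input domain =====

-- B replaces A's absolute-index loop by a recursive pre/body split with a local
-- closer search and a keyword-list `any`; objective: alternative (same cost).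

-- ===== PORT A =====
-- A's for-loop with break, as fuel recursion over the remaining iteration count.
def aKeyword (inner : List Char) : Bool :=
  PySem.Chars.isIn "sortable stats_table".toList inner
    || PySem.Chars.isIn "id=\"stats\"".toList inner
    || PySem.Chars.isIn "per_game_stats".toList inner

def aLoop : Nat → List Char → List Char
  | 0, h => h
  | Nat.succ n, h =>
    let start := PySem.Chars.find h "<!--".toList
    if start = -1 then h
    else
      let stop := PySem.Chars.findFrom h "-->".toList start none
      if stop = -1 then h
      else
        let inner := PySem.Chars.slice h (some (start + 4)) (some stop)
        if aKeyword inner then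
          aLoop n (PySem.Chars.slice h none (some start) ++ inner
                    ++ PySem.Chars.slice h (some (stop + 3)) none)
        else
          aLoop n (PySem.Chars.slice h none (some start)
                    ++ PySem.Chars.slice h (some (stop + 3)) none)

def br_uncomment_stats_tables (html : String) : String :=
  String.ofList (aLoop 40 html.toList)

-- ===== PORT B =====
def bKeywords : List (List Char) :=
  ["sortable stats_table".toList, "id=\"stats\"".toList, "per_game_stats".toList]

def bGo : List Char → Nat → List Char
  | s, 0 => s
  | s, Nat.succ fuel =>
    let i := PySem.Chars.find s "<!--".toList
    if i < 0 then s
    else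
      let pre := PySem.Chars.slice s none (some i)
      let body := PySem.Chars.slice s (some i) none
      let e := PySem.Chars.find body "-->".toList
      if e < 0 then s
      else
        let inner := PySem.Chars.slice body (some 4) (some e)
        let tail := PySem.Chars.slice body (some (e + 3)) none
        if bKeywords.any (fun kw => PySem.Chars.isIn kw inner) then
          bGo (pre ++ inner ++ tail) fuel
        else
          bGo (pre ++ tail) fuel

def br_uncomment_stats_tables_alt (html : String) : String :=
  String.ofList (bGo html.toList 40)

-- ===== PRECONDITION & SPEC =====
def Spec_br_uncomment_stats_tables (html : String) (out : String) : Prop := out = br_uncomment_stats_tables_alt html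
instance (html : String) (out : String) : Decidable (Spec_br_uncomment_stats_tables html out) := by unfold Spec_br_uncomment_stats_tables; infer_instance

-- ===== CLAIM (what is proved, stated in full; the proofs are below) =====
def Claim_equal_br_uncomment_stats_tables : Prop := ∀ (html : String), Dom_br_uncomment_stats_tables html → Spec_br_uncomment_stats_tables html (br_uncomment_stats_tables html)

-- ===== LEMMAS AND PROOFS =====
theorem aLoop_eq_bGo (n : Nat) : ∀ s, aLoop n s = bGo s n := by
  induction n with
  | zero => intro s; rfl
  | succ n ih =>
    intro s
    simp only [aLoop, bGo, PySem.Chars.slice_eq_listSlice]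
    by_cases h1 : PySem.Chars.find s "<!--".toList = -1
    · rw [if_pos h1, if_pos (show PySem.Chars.find s "<!--".toList < 0 by omega)]
    · have hge : 0 ≤ PySem.Chars.find s "<!--".toList := by
        have := PySem.Chars.neg_one_le_find s "<!--".toList
        omega
      obtain ⟨k, hk⟩ : ∃ k : Nat, PySem.Chars.find s "<!--".toList = (k : Int) :=
        ⟨(PySem.Chars.find s "<!--".toList).toNat, (Int.toNat_of_nonneg hge).symm⟩
      have hkle : k ≤ s.length := by
        have := PySem.Chars.find_le_length s "<!--".toList
        omega
      rw [hk]
      have hA1 : ¬ ((k : Int) = -1) := by omega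
      have hB1 : ¬ ((k : Int) < 0) := by omega
      have hbody : PySem.List.slice s (some (k : Int)) none = s.drop k :=
        PySem.List.slice_from_natCast s k
      have hff := PySem.Chars.findFrom_natCast s "-->".toList k hkle
      rw [if_neg hA1, if_neg hB1, hbody, hff]
      by_cases h2 : PySem.Chars.find (s.drop k) "-->".toList = -1
      · rw [if_pos h2, if_pos rfl,
          if_pos (show PySem.Chars.find (s.drop k) "-->".toList < 0 by omega)]
      · have hge2 : 0 ≤ PySem.Chars.find (s.drop k) "-->".toList := by
          have := PySem.Chars.neg_one_le_find (s.drop k) "-->".toList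
          omega
        obtain ⟨m, hm⟩ : ∃ m : Nat, PySem.Chars.find (s.drop k) "-->".toList = (m : Int) :=
          ⟨(PySem.Chars.find (s.drop k) "-->".toList).toNat, (Int.toNat_of_nonneg hge2).symm⟩
        rw [if_neg h2, hm]
        have hA2 : ¬ ((k : Int) + (m : Int) = -1) := by omega
        have hB2 : ¬ ((m : Int) < 0) := by omega
        have hinner : PySem.List.slice s (some ((k : Int) + 4)) (some ((k : Int) + (m : Int)))
            = PySem.List.slice (s.drop k) (some (4 : Int)) (some (m : Int)) := by
          have e1 : ((k : Int) + 4) = ((k + 4 : Nat) : Int) := by push_cast; ring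
          have e2 : ((k : Int) + (m : Int)) = ((k + m : Nat) : Int) := by push_cast; ring
          have e3 : (4 : Int) = ((4 : Nat) : Int) := by norm_num
          rw [e1, e2, e3, PySem.List.slice_natCast, PySem.List.slice_natCast, List.drop_drop]
          congr 1
          omega
        have htail : PySem.List.slice s (some ((k : Int) + (m : Int) + 3)) none
            = PySem.List.slice (s.drop k) (some ((m : Int) + 3)) none := by
          have e1 : ((k : Int) + (m : Int) + 3) = ((k + m + 3 : Nat) : Int) := by push_cast; ring
          have e2 : ((m : Int) + 3) = ((m + 3 : Nat) : Int) := by push_cast; ring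
          rw [e1, e2, PySem.List.slice_from_natCast, PySem.List.slice_from_natCast, List.drop_drop]
          congr 1
        have hkw : ∀ inner : List Char,
            (bKeywords.any (fun kw => PySem.Chars.isIn kw inner)) = aKeyword inner := by
          intro inner
          simp [bKeywords, aKeyword, Bool.or_assoc]
        rw [if_neg hA2, if_neg hB2, hinner, htail, hkw]
        split_ifs with hc
        · rw [ih]
        · rw [ih]

-- ===== VERDICT (by name: the statement is the Claim_ definition above) =====
theorem br_uncomment_stats_tables_spec : Claim_equal_br_uncomment_stats_tables := by
  intro html _
  unfold Spec_br_uncomment_stats_tables br_uncomment_stats_tables br_uncomment_stats_tables_alt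
  rw [aLoop_eq_bGo]
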